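-- pv_equiv track=rewrite | github.com/shawnrobinson226-source/sapphire-system | functions/docs.py | _match_doc_name
-- ===== SOURCE A (Python) =====
-- def _match_doc_name(query: str, available: dict) -> str | None:
--     """Loose matching for doc names. Returns matched key or None."""
--     query = query.lower().strip()
--
--     # Remove .md extension if provided
--     if query.endswith('.md'):
--         query = query[:-3]
--
--     # Normalize common variations
--     query = query.replace("_", "-").replace(" ", "-")
--
--     # Exact match
--     if query in available:
--         return query
--
--     # Partial match (query is substring of doc name)
--     for name in available:
--         if query in name or name in query:
--             return name
--
--     # Prefix match
--     for name in available:
--         if name.startswith(query) or query.startswith(name):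
--             return name
--
--     return None
-- ===== SOURCE B (Python) =====
-- def _match_doc_name(query: str, available: dict) -> str | None:
--     """Loose matching for doc names. Returns matched key or None."""
--     q = query.lower().strip().removesuffix('.md').translate(str.maketrans('_ ', '--'))
--     match = None
--     for name in available:
--         if name == q:
--             return q
--         if match is None and (q in name or name in q):
--             match = name
--     return match
-- ===== Notes on version B (the rewrite author's own statement) =====
-- stated objective: simpler
-- what changed: Replaced A's staged search (dict-membership exact check, then a substring loop, then a redundant prefix loop) by one pass over the keys with an accumulator: return the key itself on an exact hit, remember the first substring-related key otherwise; normalization uses removesuffix and a translate table instead of slicing and chained replace.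
import Mathlib
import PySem

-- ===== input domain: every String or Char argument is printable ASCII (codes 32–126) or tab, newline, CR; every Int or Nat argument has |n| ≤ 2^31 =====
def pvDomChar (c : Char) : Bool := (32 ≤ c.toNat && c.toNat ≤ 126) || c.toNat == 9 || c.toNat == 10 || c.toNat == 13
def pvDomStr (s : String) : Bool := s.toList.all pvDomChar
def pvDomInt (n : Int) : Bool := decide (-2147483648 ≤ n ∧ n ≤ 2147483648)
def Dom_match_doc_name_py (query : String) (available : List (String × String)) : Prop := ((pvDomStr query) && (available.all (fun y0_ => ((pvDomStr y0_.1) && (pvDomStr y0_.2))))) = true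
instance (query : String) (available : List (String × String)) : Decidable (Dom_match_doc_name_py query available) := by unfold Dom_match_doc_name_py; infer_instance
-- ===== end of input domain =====

-- B folds A's three stages (exact dict lookup, substring loop, dead prefix loop) into one accumulator pass; objective: simpler.

-- ===== PORT A =====
-- 'for name in available: if query in name or name in query: return name'
def pvLoopSub (q : String) : List String → Option String
  | [] => none
  | name :: rest =>
    if PySem.Str.isIn q name || PySem.Str.isIn name q then some name
    else pvLoopSub q rest

-- 'for name in available: if name.startswith(query) or query.startswith(name): return name'
def pvLoopPre (q : String) : List String → Option String
  | [] => none
  | name :: rest =>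
    if PySem.Str.startswith name q || PySem.Str.startswith q name then some name
    else pvLoopPre q rest

def match_doc_name_py (query : String) (available : List (String × String)) : Option String :=
  let q0 := PySem.Str.strip (PySem.Str.lower query)
  let q1 := if PySem.Str.endswith q0 ".md" then PySem.Str.slice q0 none (some (-3)) else q0
  let q := PySem.Str.replace (PySem.Str.replace q1 "_" "-") " " "-"
  let d := PySem.Dict.mk available
  if d.contains q then some q
  else
    match pvLoopSub q d.keys with
    | some n => some n
    | none => pvLoopPre q d.keys

-- ===== PORT B =====
-- the single pass with the 'match' accumulator: exact hit returns q at once, else the first loose hit is remembered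
def pvScanB (q : String) : List String → Option String → Option String
  | [], m => m
  | name :: rest, m =>
    if name == q then some q
    else pvScanB q rest (if m.isNone && (PySem.Str.isIn q name || PySem.Str.isIn name q) then some name else m)

def match_doc_name_py_alt (query : String) (available : List (String × String)) : Option String :=
  -- removesuffix('.md') ported by hand (drop the last 3 chars iff the suffix is there; exact),
  -- translate(maketrans('_ ', '--')) ported by hand as a per-character map (exact for 1-char keys/values)
  let q0 := PySem.Str.strip (PySem.Str.lower query)
  let q1 := if PySem.Str.endswith q0 ".md" then String.ofList (q0.toList.take (q0.toList.length - 3)) else q0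
  let q := String.ofList (q1.toList.map (fun c => if c == '_' || c == ' ' then '-' else c))
  pvScanB q (PySem.Dict.mk available).keys none

-- ===== PRECONDITION & SPEC =====
def Spec_match_doc_name_py (query : String) (available : List (String × String)) (out : Option String) : Prop := out = match_doc_name_py_alt query available
instance (query : String) (available : List (String × String)) (out : Option String) : Decidable (Spec_match_doc_name_py query available out) := by unfold Spec_match_doc_name_py; infer_instance

-- ===== CLAIM (what is proved, stated in full; the proofs are below) =====
def Claim_equal_match_doc_name_py : Prop := ∀ (query : String) (available : List (String × String)), Dom_match_doc_name_py query available → Spec_match_doc_name_py query available (match_doc_name_py query available)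

-- ===== LEMMAS AND PROOFS =====

-- single-character replace is a character map
theorem pvReplaceGo_single (a b : Char) : ∀ (fuel : Nat) (l acc : List Char), l.length ≤ fuel →
    PySem.Chars.replace.go [a] [b] fuel l acc
      = acc.reverse ++ l.map (fun c => if c = a then b else c) := by
  intro fuel
  induction fuel with
  | zero =>
    intro l acc h
    cases l with
    | nil => simp [PySem.Chars.replace.go]
    | cons c t => simp at h
  | succ n ih =>
    intro l acc h
    cases l with
    | nil => simp [PySem.Chars.replace.go]
    | cons c t =>
      rw [PySem.Chars.replace.go]
      by_cases hc : c = a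
      · subst hc
        rw [if_pos (by simp [List.isPrefixOf])]
        have hd : List.drop [c].length (c :: t) = t := by simp
        have hr : [b].reverse ++ acc = b :: acc := by simp
        rw [hd, hr, ih t (b :: acc) (by simpa using Nat.le_of_succ_le_succ h)]
        simp
      · have hpre : [a].isPrefixOf (c :: t) = false := by
          simp [List.isPrefixOf]
          exact fun hab => absurd hab.symm hc
        rw [hpre]
        simp only [Bool.false_eq_true, if_false]
        rw [ih t (c :: acc) (by simpa using Nat.le_of_succ_le_succ h)]
        simp [hc]

theorem pvReplace_single (a b : Char) (l : List Char) :
    PySem.Chars.replace l [a] [b] = l.map (fun c => if c = a then b else c) := by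
  rw [PySem.Chars.replace]
  simp only [List.isEmpty_cons, Bool.false_eq_true, if_false]
  exact pvReplaceGo_single a b l.length l [] (le_refl _)

-- slicing off a length-3 suffix is List.take
theorem pvSliceNeg3 {α : Type} (l : List α) (h : 3 ≤ l.length) :
    PySem.List.slice l none (some (-3)) = l.take (l.length - 3) := by
  have h3 : ¬ ((l.length : Int) + (-3) < 0) := by omega
  simp only [PySem.List.slice, PySem.List.clampIdx]
  rw [if_pos (by omega : (-3:Int) < 0), if_neg h3]
  simp only [List.drop_zero, Nat.sub_zero]
  congr 1
  omega

-- the two normalized queries coincide (s stands for query.lower().strip())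
theorem pvNorm_eq (s : String) :
    PySem.Str.replace (PySem.Str.replace (if PySem.Str.endswith s ".md" = true then PySem.Str.slice s none (some (-3)) else s) "_" "-") " " "-"
      = String.ofList ((if PySem.Str.endswith s ".md" = true then String.ofList (s.toList.take (s.toList.length - 3)) else s).toList.map
          (fun c => if (c == '_' || c == ' ') = true then '-' else c)) := by
  have hu : ("_" : String).toList = ['_'] := rfl
  have hsp : (" " : String).toList = [' '] := rfl
  have hda : ("-" : String).toList = ['-'] := rfl
  have key : ∀ t : String,
      PySem.Str.replace (PySem.Str.replace t "_" "-") " " "-"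
        = String.ofList (t.toList.map (fun c => if (c == '_' || c == ' ') = true then '-' else c)) := by
    intro t
    apply String.toList_inj.mp
    simp only [PySem.Str.toList_replace, String.toList_ofList, hu, hsp, hda]
    rw [pvReplace_single, pvReplace_single, List.map_map]
    apply List.map_congr_left
    intro c _
    by_cases h1 : c = '_'
    · subst h1; simp [Function.comp]
    · by_cases h2 : c = ' '
      · subst h2; simp [Function.comp, h1]
      · simp [Function.comp, h1, h2]
  by_cases he : PySem.Str.endswith s ".md" = true
  · have hlen : 3 ≤ s.toList.length := by
      rw [PySem.Str.endswith_eq, PySem.Chars.endswith_iff] at he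
      have := he.length_le
      simpa using this
    have hsl : PySem.Str.slice s none (some (-3))
        = String.ofList (s.toList.take (s.toList.length - 3)) := by
      apply String.toList_inj.mp
      simp only [PySem.Str.toList_slice, String.toList_ofList, PySem.Chars.slice_eq_listSlice]
      exact pvSliceNeg3 s.toList hlen
    rw [if_pos he, if_pos he, hsl, key]
  · rw [if_neg he, if_neg he, key]

theorem pvLoopSub_eq_find? (q : String) (l : List String) :
    pvLoopSub q l = l.find? (fun name => PySem.Str.isIn q name || PySem.Str.isIn name q) := by
  induction l with
  | nil => rfl
  | cons name rest ih =>
    simp only [pvLoopSub, List.find?]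
    cases hc : (PySem.Str.isIn q name || PySem.Str.isIn name q) with
    | true => rfl
    | false => simpa using ih

theorem pvLoopPre_of_sub_none (q : String) (l : List String)
    (h : pvLoopSub q l = none) : pvLoopPre q l = none := by
  induction l with
  | nil => rfl
  | cons name rest ih =>
    rw [pvLoopSub] at h
    cases hc : (PySem.Str.isIn q name || PySem.Str.isIn name q) with
    | true => rw [if_pos hc] at h; exact absurd h (by simp)
    | false =>
      rw [if_neg (by rw [hc]; simp)] at h
      have h1 : PySem.Str.isIn q name = false := by
        cases hx : PySem.Str.isIn q name
        · rfl
        · rw [hx, Bool.true_or] at hc; exact absurd hc (by simp)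
      have h2 : PySem.Str.isIn name q = false := by
        cases hx : PySem.Str.isIn name q
        · rfl
        · rw [hx, Bool.or_true] at hc; exact absurd hc (by simp)
      have hs1 : PySem.Str.startswith name q = false := by
        cases hx : PySem.Str.startswith name q
        · rfl
        · exfalso
          rw [PySem.Str.startswith_eq, PySem.Chars.startswith_iff] at hx
          have : PySem.Str.isIn q name = true := by
            rw [PySem.Str.isIn_eq, PySem.Chars.isIn_iff_infix]
            exact hx.isInfix
          rw [this] at h1; exact absurd h1 (by simp)
      have hs2 : PySem.Str.startswith q name = false := by
        cases hx : PySem.Str.startswith q name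
        · rfl
        · exfalso
          rw [PySem.Str.startswith_eq, PySem.Chars.startswith_iff] at hx
          have : PySem.Str.isIn name q = true := by
            rw [PySem.Str.isIn_eq, PySem.Chars.isIn_iff_infix]
            exact hx.isInfix
          rw [this] at h2; exact absurd h2 (by simp)
      rw [pvLoopPre, if_neg (by rw [hs1, hs2]; simp)]
      exact ih h

-- B's scan hits the exact key whenever it is present …
theorem pvScanB_of_mem (q : String) (l : List String) (h : q ∈ l) :
    ∀ m, pvScanB q l m = some q := by
  induction l with
  | nil => exact absurd h (by simp)
  | cons name rest ih =>
    intro m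
    rw [pvScanB]
    by_cases he : name == q
    · rw [if_pos he]
    · rw [if_neg he]
      have : q ∈ rest := by
        rcases List.mem_cons.mp h with h1 | h1
        · exact absurd (by rw [h1]; exact beq_self_eq_true name) he
        · exact h1
      exact ih this _

-- … and otherwise returns the remembered accumulator or the first loose match
theorem pvScanB_of_not_mem (q : String) (l : List String) (h : q ∉ l) :
    ∀ m, pvScanB q l m = m.or (l.find? (fun name => PySem.Str.isIn q name || PySem.Str.isIn name q)) := by
  induction l with
  | nil => intro m; simp [pvScanB]
  | cons name rest ih =>
    intro m
    have hne : (name == q) = false := by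
      cases hx : name == q
      · rfl
      · exact absurd (List.mem_cons_self) (by rw [eq_of_beq hx] at h; exact h)
    rw [pvScanB, if_neg (by rw [hne]; simp)]
    have hrest : q ∉ rest := fun hx => h (List.mem_cons_of_mem _ hx)
    rw [ih hrest]
    cases m with
    | some x => simp [List.find?]
    | none =>
      simp only [Option.isNone_none, Bool.true_and, Option.none_or, List.find?]
      cases hc : (PySem.Str.isIn q name || PySem.Str.isIn name q) with
      | true => simp
      | false => simp

-- ===== VERDICT (by name: the statement is the Claim_ definition above) =====
theorem match_doc_name_py_spec : Claim_equal_match_doc_name_py := by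
  intro query available _
  unfold Spec_match_doc_name_py
  simp only [match_doc_name_py, match_doc_name_py_alt]
  rw [pvNorm_eq (PySem.Str.strip (PySem.Str.lower query))]
  set q := String.ofList (((if PySem.Str.endswith (PySem.Str.strip (PySem.Str.lower query)) ".md" = true then String.ofList ((PySem.Str.strip (PySem.Str.lower query)).toList.take ((PySem.Str.strip (PySem.Str.lower query)).toList.length - 3)) else PySem.Str.strip (PySem.Str.lower query)).toList).map (fun c => if (c == '_' || c == ' ') = true then '-' else c)) with hqdef
  by_cases hm : q ∈ (PySem.Dict.mk available).keys
  · rw [pvScanB_of_mem q _ hm]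
    rw [PySem.Dict.contains_eq_decide_mem_keys, if_pos (by simpa using hm)]
  · rw [pvScanB_of_not_mem q _ hm, PySem.Dict.contains_eq_decide_mem_keys,
      if_neg (by simpa using hm), Option.none_or, ← pvLoopSub_eq_find?]
    cases hs : pvLoopSub q (PySem.Dict.mk available).keys with
    | some n => rfl
    | none => exact pvLoopPre_of_sub_none q _ hs
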